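-- pv_equiv track=rewrite | github.com/ziavengers/ZIA | src/bind_generator/storage.py | make_storage
-- ===== SOURCE A (Python) =====
-- STORAGE = (
--     'template <{typenames}>',
--     'struct Storage{n}',
--     ': public Storage{n_prec}{templates_prec}',
--     '{{',
--     'Storage{n}({params})',
--     ': Storage{n_prec}{templates_prec}({params_prec}), _t{n}(t{n})',
--     '{{}}',
--     'T{n} _t{n};',
--     '}};'
--     )
--
-- IGNORE_0 = (0, 2, 5, 7)
--
-- def make_storage(n):
--     if n < 0:
--         raise OverflowError
--     lines = make_storage(n - 1) if n else []
--     kwargs = {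
--         'n' : n,
--         'n_prec' : n - 1,
--         'typenames' : ', '.join('typename T%d' % i for i in range(1, n + 1)),
--         'templates_prec' : ('<' + ', '.join('T%d' % i for i in range(1, n)) + '>') if n > 1 else '',
--         'params' : ', '.join('T%d& t%d' % (i, i) for i in range(1, n + 1)),
--         'params_prec' : ', '.join('t%d' % i for i in range(1, n))
--         }
--     for i, line in enumerate(STORAGE):
--         if n or (not i in IGNORE_0):
--             lines.append(line.format(**kwargs))
--     return lines
-- ===== SOURCE B (Python) =====
-- STORAGE0 = ('struct Storage0', '{', 'Storage0()', '{}', '};')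
--
-- def make_storage(n):
--     if n < 0:
--         raise OverflowError
--     lines = list(STORAGE0)
--     for level in range(1, n + 1):
--         ts = ['T%d' % i for i in range(1, level + 1)]
--         typenames = ', '.join('typename ' + t for t in ts)
--         tprec = '<' + ', '.join(ts[:-1]) + '>' if level > 1 else ''
--         params = ', '.join('%s& t%d' % (t, i) for t, i in zip(ts, range(1, level + 1)))
--         pprec = ', '.join('t%d' % i for i in range(1, level))
--         lines += [
--             'template <%s>' % typenames,
--             'struct Storage%d' % level,
--             ': public Storage%d%s' % (level - 1, tprec),
--             '{',
--             'Storage%d(%s)' % (level, params),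
--             ': Storage%d%s(%s), _t%d(t%d)' % (level - 1, tprec, pprec, level, level),
--             '{}',
--             'T%d _t%d;' % (level, level),
--             '};',
--         ]
--     return lines
-- ===== Notes on version B (the rewrite author's own statement) =====
-- stated objective: simpler
-- what changed: Replaces A's recursion with enumerate/IGNORE_0 filtering by an iterative builder: a constant level-0 block followed by one flat loop appending the nine formatted lines for each level 1..n.
import Mathlib
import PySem

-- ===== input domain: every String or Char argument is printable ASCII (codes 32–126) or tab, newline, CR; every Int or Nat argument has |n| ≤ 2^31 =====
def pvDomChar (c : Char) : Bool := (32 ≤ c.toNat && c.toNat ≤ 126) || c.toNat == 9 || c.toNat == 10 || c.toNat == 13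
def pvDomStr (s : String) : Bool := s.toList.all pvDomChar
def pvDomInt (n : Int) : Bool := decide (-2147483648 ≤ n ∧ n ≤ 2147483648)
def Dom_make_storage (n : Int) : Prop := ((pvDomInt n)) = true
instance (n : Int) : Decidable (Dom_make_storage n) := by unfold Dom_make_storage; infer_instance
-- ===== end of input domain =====

-- B replaces A's recursion+enumerate/IGNORE_0 filter by an iterative builder: a constant
-- level-0 block followed by one flat loop over levels 1..n (objective: simpler decomposition).

-- ===== PORT A =====
def IGNORE_0 : List Int := [0, 2, 5, 7]

-- STORAGE with kwargs(n) substituted; line-for-line the tuple of format strings of A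
def aKwLines (n : Int) : List String :=
  let typenames := PySem.Str.join ", " ((PySem.List.pyRange 1 (n + 1) 1).map
    (fun i => "typename T" ++ PySem.Int.toStr i))
  let templates_prec := if n > 1 then
    "<" ++ PySem.Str.join ", " ((PySem.List.pyRange 1 n 1).map (fun i => "T" ++ PySem.Int.toStr i)) ++ ">"
    else ""
  let params := PySem.Str.join ", " ((PySem.List.pyRange 1 (n + 1) 1).map
    (fun i => "T" ++ PySem.Int.toStr i ++ "& t" ++ PySem.Int.toStr i))
  let params_prec := PySem.Str.join ", " ((PySem.List.pyRange 1 n 1).map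
    (fun i => "t" ++ PySem.Int.toStr i))
  [ "template <" ++ typenames ++ ">",
    "struct Storage" ++ PySem.Int.toStr n,
    ": public Storage" ++ PySem.Int.toStr (n - 1) ++ templates_prec,
    "{",
    "Storage" ++ PySem.Int.toStr n ++ "(" ++ params ++ ")",
    ": Storage" ++ PySem.Int.toStr (n - 1) ++ templates_prec ++ "(" ++ params_prec
      ++ "), _t" ++ PySem.Int.toStr n ++ "(t" ++ PySem.Int.toStr n ++ ")",
    "{}",
    "T" ++ PySem.Int.toStr n ++ " _t" ++ PySem.Int.toStr n ++ ";",
    "};" ]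

-- the 'for i, line in enumerate(STORAGE): if n or (not i in IGNORE_0): lines.append(...)' loop
def aLoop (n : Int) (lines : List String) : List String :=
  (PySem.List.enumerate (aKwLines n)).foldl
    (fun acc p => if n ≠ 0 ∨ p.1 ∉ IGNORE_0 then acc ++ [p.2] else acc) lines

def aRec : Nat → List String
  | 0 => aLoop 0 []
  | k + 1 => aLoop ((k : Int) + 1) (aRec k)

def make_storage (n : Int) : List String :=
  if n < 0 then [] else aRec n.toNat  -- n < 0: A raises OverflowError (outside Pre_)

-- ===== PORT B =====
def STORAGE0 : List String := ["struct Storage0", "{", "Storage0()", "{}", "};"]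

def bBlock (level : Int) : List String :=
  let ts := (PySem.List.pyRange 1 (level + 1) 1).map (fun i => "T" ++ PySem.Int.toStr i)
  let typenames := PySem.Str.join ", " (ts.map (fun t => "typename " ++ t))
  -- ts[:-1] is exactly List.dropLast (drop the last element)
  let tprec := if level > 1 then "<" ++ PySem.Str.join ", " ts.dropLast ++ ">" else ""
  let params := PySem.Str.join ", " ((ts.zip (PySem.List.pyRange 1 (level + 1) 1)).map
    (fun p => p.1 ++ "& t" ++ PySem.Int.toStr p.2))
  let pprec := PySem.Str.join ", " ((PySem.List.pyRange 1 level 1).map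
    (fun i => "t" ++ PySem.Int.toStr i))
  [ "template <" ++ typenames ++ ">",
    "struct Storage" ++ PySem.Int.toStr level,
    ": public Storage" ++ PySem.Int.toStr (level - 1) ++ tprec,
    "{",
    "Storage" ++ PySem.Int.toStr level ++ "(" ++ params ++ ")",
    ": Storage" ++ PySem.Int.toStr (level - 1) ++ tprec ++ "(" ++ pprec
      ++ "), _t" ++ PySem.Int.toStr level ++ "(t" ++ PySem.Int.toStr level ++ ")",
    "{}",
    "T" ++ PySem.Int.toStr level ++ " _t" ++ PySem.Int.toStr level ++ ";",
    "};" ]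

def make_storage_alt (n : Int) : List String :=
  if n < 0 then []  -- B raises OverflowError here too (outside Pre_)
  else (PySem.List.pyRange 1 (n + 1) 1).foldl (fun lines level => lines ++ bBlock level) STORAGE0

-- ===== PRECONDITION & SPEC =====
-- A (and B) raise OverflowError exactly when n < 0; Pre_ admits everything else.
def Pre_make_storage (n : Int) : Prop := 0 ≤ n
instance (n : Int) : Decidable (Pre_make_storage n) := by unfold Pre_make_storage; infer_instance
def pvWitness_make_storage : Int := (2)

def Spec_make_storage (n : Int) (out : List String) : Prop := out = make_storage_alt n
instance (n : Int) (out : List String) : Decidable (Spec_make_storage n out) := by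
  unfold Spec_make_storage; infer_instance

-- ===== CLAIM (what is proved, stated in full; the proofs are below) =====
def Claim_equal_make_storage : Prop :=
  ∀ (n : Int), Dom_make_storage n → Pre_make_storage n → Spec_make_storage n (make_storage n)

-- ===== LEMMAS AND PROOFS =====

-- with the loop's test forced true, A's append loop concatenates the seconds
lemma foldl_if_snd {n : Int} (hn : n ≠ 0) (l : List (Int × String)) (acc : List String) :
    l.foldl (fun acc p => if n ≠ 0 ∨ p.1 ∉ IGNORE_0 then acc ++ [p.2] else acc) acc
      = acc ++ l.map Prod.snd := by
  induction l generalizing acc with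
  | nil => simp
  | cons x xs ih =>
    rw [List.foldl_cons, if_pos (Or.inl hn), ih]
    simp

lemma aLoop_pos {n : Int} (hn : n ≠ 0) (lines : List String) :
    aLoop n lines = lines ++ aKwLines n := by
  unfold aLoop
  rw [foldl_if_snd hn, PySem.List.map_snd_enumerate]

lemma block_eq (L : Int) (hL : 1 ≤ L) : aKwLines L = bBlock L := by
  unfold aKwLines bBlock
  have hdrop : ((PySem.List.pyRange 1 (L + 1) 1).map
      (fun i => "T" ++ PySem.Int.toStr i)).dropLast
      = (PySem.List.pyRange 1 L 1).map (fun i => "T" ++ PySem.Int.toStr i) := by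
    rw [PySem.List.pyRange_one_succ_right (by omega : (1:Int) ≤ L)]
    simp
  have htyp : ((PySem.List.pyRange 1 (L + 1) 1).map
        (fun i => "T" ++ PySem.Int.toStr i)).map (fun t => "typename " ++ t)
      = (PySem.List.pyRange 1 (L + 1) 1).map (fun i => "typename T" ++ PySem.Int.toStr i) := by
    rw [List.map_map]
    exact List.map_congr_left (fun i _ => by
      show "typename " ++ ("T" ++ PySem.Int.toStr i) = _
      rw [← String.append_assoc]
      rfl)
  have hpar : ((PySem.List.pyRange 1 (L + 1) 1).map (fun i => "T" ++ PySem.Int.toStr i)).zip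
        (PySem.List.pyRange 1 (L + 1) 1)
      = (PySem.List.pyRange 1 (L + 1) 1).map (fun i => ("T" ++ PySem.Int.toStr i, i)) := by
    simpa using List.zip_map' (f := fun i => "T" ++ PySem.Int.toStr i) (g := (id : Int → Int))
      (l := PySem.List.pyRange 1 (L + 1) 1)
  simp only [htyp, hdrop, hpar, List.map_map]
  rfl

lemma aRec_eq (k : Nat) :
    aRec k = (PySem.List.pyRange 1 ((k : Int) + 1) 1).foldl
      (fun lines level => lines ++ bBlock level) STORAGE0 := by
  induction k with
  | zero =>
    rw [show ((0 : Nat) : Int) + 1 = 1 by norm_num,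
      PySem.List.pyRange_one_eq_nil (le_refl 1)]
    show aRec 0 = STORAGE0
    decide
  | succ k ih =>
    show aLoop ((k : Int) + 1) (aRec k) = _
    rw [aLoop_pos (by omega), block_eq _ (by omega), ih,
      show ((k + 1 : Nat) : Int) + 1 = ((k : Int) + 1) + 1 by push_cast; ring,
      PySem.List.pyRange_one_succ_right (by omega : (1:Int) ≤ (k : Int) + 1),
      List.foldl_append]
    rfl

-- ===== VERDICT (by name: the statement is the Claim_ definition above) =====
theorem make_storage_spec : Claim_equal_make_storage := by
  intro n _ hpre
  unfold Pre_make_storage at hpre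
  unfold Spec_make_storage make_storage make_storage_alt
  rw [if_neg (by omega), if_neg (by omega), aRec_eq,
    Int.toNat_of_nonneg hpre]
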